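-- pv_equiv track=rewrite | github.com/ashwani90/algos | array/minEqualSumOfTwoArray.py | minSum
-- ===== SOURCE A (Python) =====
-- def minSum(nums1, nums2):
--     sum1 = sum(nums1)
--     sum2 = sum(nums2)
--
--     diff = abs(sum1 - sum2)
--
--     # Count zeros in both arrays
--     zeros1 = nums1.count(0)
--     zeros2 = nums2.count(0)
--
--     # Step 2: Early exit for feasibility
--     if diff == 0:
--         return sum1  # Already equal
--     if zeros1 + zeros2 < diff:
--         return -1  # Not enough zeros to bridge the gap
--
--     min_adds = []
--     if sum1 < sum2:
--         min_adds.extend(1 for _ in range(zeros1))  # Replace nums1 zeros with 1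
--         min_adds.extend(range(1, zeros2 + 1))  # Replace nums2 zeros with increasing values
--     else:
--         min_adds.extend(range(1, zeros1 + 1))  # Replace nums1 zeros with increasing values
--         min_adds.extend(1 for _ in range(zeros2))  # Replace nums2 zeros with 1
--
--     # Use smallest additions to balance the difference
--     min_adds.sort()
--     total_added = 0
--     for add in min_adds:
--         if diff <= 0:
--             break
--         total_added += add
--         diff -= 1
--
--     if diff > 0:
--         return -1  # Unable to balance
--     return max(sum1, sum2) + total_added
-- ===== SOURCE B (Python) =====
-- def minSum(nums1, nums2):
--     s1 = sum(nums1)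
--     s2 = sum(nums2)
--     d = abs(s1 - s2)
--     if d == 0:
--         return s1
--     z1 = nums1.count(0)
--     z2 = nums2.count(0)
--     if z1 + z2 < d:
--         return -1
--     # zeros on the smaller side contribute 1 each; zeros on the larger side
--     # contribute 1, 2, 3, ...  The available values, in increasing order, are
--     # o = a + min(b, 1) ones followed by 2, 3, ..., b.  The d smallest sum to
--     # a closed form: d if d <= o, else o + (2 + 3 + ... + (d - o + 1)).
--     a, b = (z1, z2) if s1 < s2 else (z2, z1)
--     o = a + min(b, 1)
--     if d <= o:
--         total = d
--     else:
--         k = d - o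
--         total = o + (k + 1) * (k + 2) // 2 - 1
--     return max(s1, s2) + total
-- ===== Notes on version B (the rewrite author's own statement) =====
-- stated objective: alternative
-- what changed: B replaces A's build-extend-sort-and-scan of the per-zero replacement list with a closed-form formula for the sum of the d smallest replacement values (ones plus 1..b); the list, the sort and the scanning loop disappear.
import Mathlib
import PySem

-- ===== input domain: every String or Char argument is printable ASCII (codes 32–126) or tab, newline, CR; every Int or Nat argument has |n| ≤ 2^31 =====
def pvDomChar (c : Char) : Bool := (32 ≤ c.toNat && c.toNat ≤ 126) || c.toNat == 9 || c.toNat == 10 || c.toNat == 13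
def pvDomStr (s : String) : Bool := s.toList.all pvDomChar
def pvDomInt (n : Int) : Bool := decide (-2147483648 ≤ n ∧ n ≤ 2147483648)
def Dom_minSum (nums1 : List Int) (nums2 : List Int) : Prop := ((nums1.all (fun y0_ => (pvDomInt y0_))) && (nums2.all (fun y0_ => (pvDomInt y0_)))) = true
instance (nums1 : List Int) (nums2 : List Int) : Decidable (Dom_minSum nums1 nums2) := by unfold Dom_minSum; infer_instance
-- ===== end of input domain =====

-- ===== PORT A =====
-- B computes the sum of the d smallest replacement values in closed form instead of building, sorting and scanning the replacement list (objective: alternative).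
def minSumLoop : List Int → Int → Int → Int × Int
  | [], total, diff => (total, diff)
  | add :: rest, total, diff =>
      if diff ≤ 0 then (total, diff)
      else minSumLoop rest (total + add) (diff - 1)

def minSum (nums1 : List Int) (nums2 : List Int) : Int :=
  let sum1 := nums1.sum
  let sum2 := nums2.sum
  let diff := |sum1 - sum2|
  let zeros1 : Nat := PySem.List.count nums1 0
  let zeros2 : Nat := PySem.List.count nums2 0
  if diff = 0 then sum1
  else if (zeros1 : Int) + (zeros2 : Int) < diff then -1
  else
    let minAdds : List Int :=
      if sum1 < sum2 then
        List.replicate zeros1 1 ++ PySem.List.pyRange 1 ((zeros2 : Int) + 1) 1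
      else
        PySem.List.pyRange 1 ((zeros1 : Int) + 1) 1 ++ List.replicate zeros2 1
    let sortedAdds := PySem.List.sorted minAdds (fun x => x) false
    let res := minSumLoop sortedAdds 0 diff
    if res.2 > 0 then -1 else max sum1 sum2 + res.1

-- ===== PORT B =====
def minSum_alt (nums1 : List Int) (nums2 : List Int) : Int :=
  let s1 := nums1.sum
  let s2 := nums2.sum
  let d := |s1 - s2|
  if d = 0 then s1
  else
    let z1 : Int := PySem.List.count nums1 0
    let z2 : Int := PySem.List.count nums2 0
    if z1 + z2 < d then -1
    else
      let ab := if s1 < s2 then (z1, z2) else (z2, z1)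
      let a := ab.1
      let b := ab.2
      let o := a + min b 1
      let total :=
        if d ≤ o then d
        else
          let k := d - o
          o + PySem.Int.floordiv ((k + 1) * (k + 2)) 2 - 1
      max s1 s2 + total

-- ===== PRECONDITION & SPEC =====
def Spec_minSum (nums1 : List Int) (nums2 : List Int) (out : Int) : Prop := out = minSum_alt nums1 nums2
instance (nums1 : List Int) (nums2 : List Int) (out : Int) : Decidable (Spec_minSum nums1 nums2 out) := by unfold Spec_minSum; infer_instance

-- ===== CLAIM (what is proved, stated in full; the proofs are below) =====
def Claim_equal_minSum : Prop := ∀ (nums1 : List Int) (nums2 : List Int), Dom_minSum nums1 nums2 → Spec_minSum nums1 nums2 (minSum nums1 nums2)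

-- ===== LEMMAS AND PROOFS =====

theorem minSumLoop_eq (S : List Int) (t d : Int) (h0 : 0 ≤ d) (hl : d.toNat ≤ S.length) :
    minSumLoop S t d = (t + (S.take d.toNat).sum, 0) := by
  induction S generalizing t d with
  | nil =>
      simp at hl
      have : d = 0 := by omega
      simp [minSumLoop, this]
  | cons x rest ih =>
      by_cases hd : d ≤ 0
      · have : d = 0 := le_antisymm hd h0
        simp [minSumLoop, this]
      · have h1 : ¬ d ≤ 0 := hd
        have h2 : (d-1).toNat ≤ rest.length := by simp at hl; omega
        have h3 : d.toNat = (d-1).toNat + 1 := by omega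
        simp only [minSumLoop, if_neg h1, ih (t + x) (d-1) (by omega) h2, h3,
          List.take_succ_cons, List.sum_cons]
        ring_nf

theorem sum_pyRange_two (k : Nat) :
    (PySem.List.pyRange 2 ((k:Int)+2) 1).sum * 2 = ((k:Int)+1) * ((k:Int)+2) - 2 := by
  induction k with
  | zero => decide
  | succ m ih =>
      have h : (2:Int) ≤ (m:Int) + 2 := by omega
      have : ((m:Int)+1) + 2 = ((m:Int)+2) + 1 := by ring
      rw [show ((m+1:Nat):Int) + 2 = ((m:Int)+2)+1 by push_cast; ring,
          PySem.List.pyRange_one_succ_right h]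
      simp [List.sum_append]
      nlinarith [ih]

theorem pairwise_S (o : Nat) (c : Int) :
    (List.replicate o (1:Int) ++ PySem.List.pyRange 2 c 1).Pairwise (· ≤ ·) := by
  rw [List.pairwise_append]
  refine ⟨List.pairwise_replicate.mpr (by simp), ?_, ?_⟩
  · exact (PySem.List.pairwise_lt_pyRange_one 2 c).imp le_of_lt
  · intro x hx y hy
    have hx1 := List.eq_of_mem_replicate hx
    have hy2 := (PySem.List.mem_pyRange_one.mp hy).1
    omega

theorem sorted_rep_range (a b : Nat) :
    PySem.List.sorted (List.replicate a (1:Int) ++ PySem.List.pyRange 1 ((b:Int)+1) 1) (fun x => x) false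
      = List.replicate (a + min b 1) (1:Int) ++ PySem.List.pyRange 2 ((b:Int)+1) 1 := by
  rcases Nat.eq_zero_or_pos b with hb | hb
  · subst hb
    rw [PySem.List.pyRange_one_eq_nil (by norm_num), PySem.List.pyRange_one_eq_nil (by norm_num),
      List.append_nil, List.append_nil, show a + min 0 1 = a from by omega]
    exact PySem.List.sorted_eq_self_of_pairwise _ _ (List.pairwise_replicate.mpr (Or.inr le_rfl))
  · have hcons : PySem.List.pyRange 1 ((b:Int)+1) 1 = 1 :: PySem.List.pyRange 2 ((b:Int)+1) 1 :=
      PySem.List.pyRange_one_cons (by exact_mod_cast Nat.lt_add_of_pos_left hb)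
    have hys : List.replicate (a + 1) (1:Int) ++ PySem.List.pyRange 2 ((b:Int)+1) 1
        = List.replicate a (1:Int) ++ PySem.List.pyRange 1 ((b:Int)+1) 1 := by
      rw [hcons, List.replicate_succ', List.append_assoc]
      rfl
    rw [show min b 1 = 1 from by omega]
    refine PySem.List.sorted_id_eq_of_perm_of_pairwise _ _ ?_ (pairwise_S (a+1) ((b:Int)+1))
    rw [hys]

theorem sorted_range_rep (a b : Nat) :
    PySem.List.sorted (PySem.List.pyRange 1 ((b:Int)+1) 1 ++ List.replicate a (1:Int)) (fun x => x) false
      = List.replicate (a + min b 1) (1:Int) ++ PySem.List.pyRange 2 ((b:Int)+1) 1 := by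
  rcases Nat.eq_zero_or_pos b with hb | hb
  · subst hb
    rw [PySem.List.pyRange_one_eq_nil (by norm_num), PySem.List.pyRange_one_eq_nil (by norm_num),
      List.nil_append, List.append_nil, show a + min 0 1 = a from by omega]
    exact PySem.List.sorted_eq_self_of_pairwise _ _ (List.pairwise_replicate.mpr (Or.inr le_rfl))
  · have hcons : PySem.List.pyRange 1 ((b:Int)+1) 1 = 1 :: PySem.List.pyRange 2 ((b:Int)+1) 1 :=
      PySem.List.pyRange_one_cons (by exact_mod_cast Nat.lt_add_of_pos_left hb)
    have hys : List.replicate (a + 1) (1:Int) ++ PySem.List.pyRange 2 ((b:Int)+1) 1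
        = List.replicate a (1:Int) ++ PySem.List.pyRange 1 ((b:Int)+1) 1 := by
      rw [hcons, List.replicate_succ', List.append_assoc]
      rfl
    rw [show min b 1 = 1 from by omega]
    refine PySem.List.sorted_id_eq_of_perm_of_pairwise _ _ ?_ (pairwise_S (a+1) ((b:Int)+1))
    rw [hys]
    exact List.perm_append_comm

theorem take_pyRange_two (k b : Nat) (hk1 : 1 ≤ k) (hk : k ≤ ((b:Int)+1-2).toNat) :
    (PySem.List.pyRange 2 ((b:Int)+1) 1).take k = PySem.List.pyRange 2 ((k:Int)+2) 1 := by
  have hsplit : PySem.List.pyRange 2 ((b:Int)+1) 1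
      = PySem.List.pyRange 2 ((k:Int)+2) 1 ++ PySem.List.pyRange ((k:Int)+2) ((b:Int)+1) 1 := by
    have h1 : (2:Int) ≤ (k:Int)+2 := by omega
    have h2 : (k:Int)+2 ≤ (b:Int)+1 := by omega
    exact PySem.List.pyRange_one_append 2 ((k:Int)+2) ((b:Int)+1) h1 h2
  have hlen : (PySem.List.pyRange 2 ((k:Int)+2) 1).length = k := by
    rw [PySem.List.length_pyRange_one]; omega
  rw [hsplit, List.take_append, hlen]
  simp

theorem takeSum (o b n : Nat) (h : n ≤ o + (((b:Int)+1-2).toNat)) :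
    ((List.replicate o (1:Int) ++ PySem.List.pyRange 2 ((b:Int)+1) 1).take n).sum
      = if (n:Int) ≤ (o:Int) then (n:Int)
        else (o:Int) + PySem.Int.floordiv (((n:Int)-(o:Int)+1) * ((n:Int)-(o:Int)+2)) 2 - 1 := by
  rw [List.take_append]
  by_cases hno : (n:Int) ≤ (o:Int)
  · have h1 : n - o = 0 := by omega
    have h2 : (List.replicate o (1:Int)).take n = List.replicate n 1 := by
      rw [List.take_replicate]; congr 1; omega
    simp [hno, h1, h2, List.sum_replicate]
  · have hon : o ≤ n := by omega
    have h2 : (List.replicate o (1:Int)).take n = List.replicate o 1 := by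
      rw [List.take_replicate]; congr 1; omega
    have hk : n - o ≤ ((b:Int)+1-2).toNat := by omega
    rw [if_neg hno, h2, List.sum_append, List.sum_replicate]
    simp only [List.length_replicate]
    rw [take_pyRange_two (n-o) b (by omega) hk]
    have hfd : PySem.Int.floordiv (((n:Int)-(o:Int)+1) * ((n:Int)-(o:Int)+2)) 2
        = (PySem.List.pyRange 2 (((n-o : Nat):Int)+2) 1).sum + 1 := by
      rw [PySem.Int.floordiv_eq_iff_of_pos (by norm_num)]
      have := sum_pyRange_two (n - o)
      push_cast [hon] at this ⊢
      constructor <;> nlinarith [this]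
    rw [hfd]
    simp
    push_cast [hon]
    ring

theorem main_eq (nums1 nums2 : List Int) : minSum nums1 nums2 = minSum_alt nums1 nums2 := by
  simp only [minSum, minSum_alt]
  set s1 := nums1.sum with hs1
  set s2 := nums2.sum with hs2
  set z1 := PySem.List.count nums1 0 with hz1
  set z2 := PySem.List.count nums2 0 with hz2
  by_cases hd0 : |s1 - s2| = 0
  · simp [hd0]
  · rw [if_neg hd0, if_neg hd0]
    by_cases hz : (z1:Int) + (z2:Int) < |s1 - s2|
    · simp [hz]
    · rw [if_neg hz, if_neg hz]
      have habs : 0 ≤ |s1 - s2| := abs_nonneg _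
      have hdz : |s1 - s2|.toNat ≤ z1 + z2 := by omega
      have htn : (|s1 - s2|.toNat : Int) = |s1 - s2| := Int.toNat_of_nonneg habs
      by_cases hlt : s1 < s2
      · rw [if_pos hlt, if_pos hlt, sorted_rep_range z1 z2]
        have hlen : |s1 - s2|.toNat ≤ (List.replicate (z1 + min z2 1) (1:Int)
            ++ PySem.List.pyRange 2 ((z2:Int)+1) 1).length := by
          rw [List.length_append, List.length_replicate, PySem.List.length_pyRange_one]
          omega
        rw [minSumLoop_eq _ 0 _ habs hlen]
        simp only [gt_iff_lt, lt_irrefl, if_false, zero_add]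
        rw [takeSum (z1 + min z2 1) z2 |s1 - s2|.toNat (by
          rw [List.length_append, List.length_replicate, PySem.List.length_pyRange_one] at hlen
          omega)]
        push_cast [htn]
        rfl
      · rw [if_neg hlt, if_neg hlt, sorted_range_rep z2 z1]
        have hlen : |s1 - s2|.toNat ≤ (List.replicate (z2 + min z1 1) (1:Int)
            ++ PySem.List.pyRange 2 ((z1:Int)+1) 1).length := by
          rw [List.length_append, List.length_replicate, PySem.List.length_pyRange_one]
          omega
        rw [minSumLoop_eq _ 0 _ habs hlen]
        simp only [gt_iff_lt, lt_irrefl, if_false, zero_add]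
        rw [takeSum (z2 + min z1 1) z1 |s1 - s2|.toNat (by
          rw [List.length_append, List.length_replicate, PySem.List.length_pyRange_one] at hlen
          omega)]
        push_cast [htn]
        rfl

-- ===== VERDICT (by name: the statement is the Claim_ definition above) =====
theorem minSum_spec : Claim_equal_minSum := fun nums1 nums2 _ => main_eq nums1 nums2
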